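-- pv_equiv track=rewrite | github.com/pritamdodeja/tabular_knowledge | src/tabular_knowledge/tabular_knowledge.py | shorten_param
-- ===== SOURCE A (Python) =====
-- def shorten_param(param_name):
--     if "__" in param_name:
--         if len(param_name.rsplit(" ", 1)) < 2:
--             return param_name.rsplit("__", 1)[1]
--         else:
--             return str(shorten_param(param_name.rsplit(" ", 1)[
--                        0])) + " " + shorten_param(' '.join(param_name.rsplit(" ", 1)[1:]))
--     return param_name
-- ===== SOURCE B (Python) =====
-- def shorten_param(param_name):
--     # One left-to-right pass: within each space-delimited token keep only the
--     # characters after the last "__"; spaces are copied through unchanged.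
--     out = []
--     cur = []
--     last_us = False
--     for c in param_name:
--         if c == ' ':
--             out.append(''.join(cur))
--             out.append(' ')
--             cur = []
--             last_us = False
--         elif c == '_' and last_us:
--             # a "__" ends here: drop everything collected so far in this token
--             # (last_us stays True so overlapping runs of '_' keep resetting,
--             #  matching the rightmost occurrence of "__")
--             cur = []
--         else:
--             cur.append(c)
--             last_us = (c == '_')
--     out.append(''.join(cur))
--     return ''.join(out)
-- ===== Notes on version B (the rewrite author's own statement) =====
-- stated objective: alternative
-- what changed: Replaces A's recursion (peel the last space-separated token with rsplit at each level and rejoin) by a single left-to-right character scan that keeps, within each space-delimited token, only the characters after the last double-underscore separator.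
import Mathlib
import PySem

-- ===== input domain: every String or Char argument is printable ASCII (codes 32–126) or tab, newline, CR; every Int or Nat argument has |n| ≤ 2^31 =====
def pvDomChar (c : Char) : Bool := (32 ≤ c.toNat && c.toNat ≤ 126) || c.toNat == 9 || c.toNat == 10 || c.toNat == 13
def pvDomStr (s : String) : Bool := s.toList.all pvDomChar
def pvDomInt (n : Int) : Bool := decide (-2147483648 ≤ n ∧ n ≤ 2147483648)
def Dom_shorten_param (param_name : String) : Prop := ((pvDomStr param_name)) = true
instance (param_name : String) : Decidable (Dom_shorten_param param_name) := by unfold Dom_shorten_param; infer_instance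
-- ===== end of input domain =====

-- B replaces A's recursive rsplit-and-rejoin with a single left-to-right character scan; same return value (proved below).

-- ===== PORT A =====
-- s.rsplit(sep, 1) ported by hand (PySem has no rsplit): none = sep does not occur
-- (Python returns the one-element list [s]); some (l, r) = split at the RIGHTMOST
-- occurrence of sep (Python returns [l, r]). Exact for nonempty sep.
def pyRsplit1 (cs sep : List Char) : Option (List Char × List Char) :=
  match cs with
  | [] => none
  | c :: rest =>
    match pyRsplit1 rest sep with
    | some (l, r) => some (c :: l, r)
    | none =>
      if sep.isPrefixOf (c :: rest) then some ([], (c :: rest).drop sep.length)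
      else none

theorem pyRsplit1_some_eq {cs sep l r : List Char}
    (h : pyRsplit1 cs sep = some (l, r)) : cs = l ++ sep ++ r := by
  induction cs generalizing l r with
  | nil => simp [pyRsplit1] at h
  | cons c rest ih =>
    rw [pyRsplit1] at h
    cases hrec : pyRsplit1 rest sep with
    | some p =>
      rw [hrec] at h
      obtain ⟨l', r'⟩ := p
      simp only [Option.some.injEq, Prod.mk.injEq] at h
      obtain ⟨h1, h2⟩ := h
      subst h1; subst h2
      simp [ih hrec]
    | none =>
      rw [hrec] at h
      split_ifs at h with hp
      · simp only [Option.some.injEq, Prod.mk.injEq] at h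
        obtain ⟨h1, h2⟩ := h
        subst h1; subst h2
        obtain ⟨t, ht⟩ := List.isPrefixOf_iff_prefix.mp hp
        rw [List.nil_append, ← ht, List.drop_left]

theorem pyRsplit1_length {cs sep l r : List Char}
    (h : pyRsplit1 cs sep = some (l, r)) :
    cs.length = l.length + sep.length + r.length := by
  have := pyRsplit1_some_eq h
  subst this
  simp; omega

-- Literal port of A:
--   if "__" in param_name:
--       if len(param_name.rsplit(" ", 1)) < 2:            (= no space: pyRsplit1 … [' '] = none)
--           return param_name.rsplit("__", 1)[1]
--       else:
--           return str(shorten_param(left)) + " " + shorten_param(last)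
--   return param_name
-- When "__" is in param_name, pyRsplit1 cs ['_','_'] is provably some; the inner
-- 'none' arm is unreachable (Python's [1] cannot raise IndexError there).
def shortenA (cs : List Char) : List Char :=
  if PySem.Chars.isIn ['_', '_'] cs then
    match h : pyRsplit1 cs [' '] with
    | none =>
      match pyRsplit1 cs ['_', '_'] with
      | some (_, r) => r
      | none => cs   -- unreachable: "__" occurs in cs
    | some (l, r) => shortenA l ++ ' ' :: shortenA r
  else cs
termination_by cs.length
decreasing_by
  · have := pyRsplit1_length h; simp at this; omega
  · have := pyRsplit1_length h; simp at this; omega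

def shorten_param (param_name : String) : String :=
  String.ofList (shortenA param_name.toList)

-- ===== PORT B =====
-- Literal port of Source B's single scan: state = (out, cur, last_us).
def stepB (s : List Char × List Char × Bool) (c : Char) : List Char × List Char × Bool :=
  if c = ' ' then (s.1 ++ s.2.1 ++ [' '], [], false)
  else if c = '_' ∧ s.2.2 = true then (s.1, [], s.2.2)
  else (s.1, s.2.1 ++ [c], c == '_')

def shortenB (cs : List Char) : List Char :=
  let f := cs.foldl stepB ([], [], false)
  f.1 ++ f.2.1

def shorten_param_alt (param_name : String) : String :=
  String.ofList (shortenB param_name.toList)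

-- ===== PRECONDITION & SPEC =====
def Spec_shorten_param (param_name : String) (out : String) : Prop := out = shorten_param_alt param_name
instance (param_name : String) (out : String) : Decidable (Spec_shorten_param param_name out) := by unfold Spec_shorten_param; infer_instance

-- ===== CLAIM (what is proved, stated in full; the proofs are below) =====
def Claim_equal_shorten_param : Prop := ∀ (param_name : String), Dom_shorten_param param_name → Spec_shorten_param param_name (shorten_param param_name)

-- ===== LEMMAS AND PROOFS =====

theorem pyRsplit1_none_iff {cs sep : List Char} (hsep : sep ≠ []) :
    pyRsplit1 cs sep = none ↔ ¬ sep <:+: cs := by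
  induction cs with
  | nil => simp [pyRsplit1, List.infix_nil, hsep]
  | cons c rest ih =>
    rw [pyRsplit1]
    cases hrec : pyRsplit1 rest sep with
    | some p =>
      obtain ⟨l, r⟩ := p
      have hr : rest = l ++ sep ++ r := pyRsplit1_some_eq hrec
      simp only [reduceCtorEq, false_iff, not_not]
      exact ⟨c :: l, r, by simp [hr]⟩
    | none =>
      have hni := ih.mp hrec
      rw [List.infix_cons_iff]
      split_ifs with hp
      · constructor
        · intro h; exact h.elim
        · intro hn; exact absurd (Or.inl (List.isPrefixOf_iff_prefix.mp hp)) hn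
      · constructor
        · rintro - (h | h)
          · exact hp (List.isPrefixOf_iff_prefix.mpr h)
          · exact hni h
        · intro; rfl


-- "the part of p after the last __" (p itself when "__" does not occur)
def tail2 (p : List Char) : List Char :=
  match pyRsplit1 p ['_', '_'] with
  | some (_, r) => r
  | none => p

-- the scan only ever APPENDS to the out component
theorem foldl_stepB_out (cs : List Char) (o c : List Char) (b : Bool) :
    cs.foldl stepB (o, c, b) =
      (o ++ (cs.foldl stepB ([], c, b)).1, (cs.foldl stepB ([], c, b)).2) := by
  induction cs generalizing o c b with
  | nil => simp
  | cons x xs ih =>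
    simp only [List.foldl_cons]
    by_cases hx : x = ' '
    · simp only [stepB, hx, reduceIte]
      rw [ih (o ++ c ++ [' ']) [] false, ih ([] ++ c ++ [' ']) [] false]
      simp
    · by_cases hb : x = '_' ∧ b = true
      · simp only [stepB, if_neg hx, if_pos hb]
        rw [ih o [] b]
      · simp only [stepB, if_neg hx, if_neg hb]
        rw [ih o (c ++ [x]) (x == '_')]

theorem shortenB_split (l r : List Char) :
    shortenB (l ++ ' ' :: r) = shortenB l ++ ' ' :: shortenB r := by
  unfold shortenB
  rw [show l ++ ' ' :: r = (l ++ [' ']) ++ r by simp, List.foldl_append, List.foldl_append]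
  rcases hl : l.foldl stepB ([], [], false) with ⟨o, c, b⟩
  simp only [List.foldl_cons, List.foldl_nil, stepB, reduceIte]
  rw [foldl_stepB_out r (o ++ c ++ [' ']) [] false]
  simp

theorem pyRsplit1_snoc (p : List Char) (c : Char)
    (h : ¬(c = '_' ∧ p.getLast? = some '_')) :
    pyRsplit1 (p ++ [c]) ['_', '_'] =
      match pyRsplit1 p ['_', '_'] with
      | some (l, r) => some (l, r ++ [c])
      | none => none := by
  induction p with
  | nil =>
    have : ¬(['_', '_'].isPrefixOf [c]) := by simp [List.isPrefixOf]
    simp [pyRsplit1, this]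
  | cons a p' ih =>
    have h' : ¬(c = '_' ∧ p'.getLast? = some '_') := by
      cases p' with
      | nil => simp
      | cons b p'' => simpa [List.getLast?_cons_cons] using h
    rw [List.cons_append, pyRsplit1, ih h']
    cases hrec : pyRsplit1 p' ['_', '_'] with
    | some q =>
      obtain ⟨l, r⟩ := q
      conv_rhs => rw [pyRsplit1, hrec]
    | none =>
      conv_rhs => rw [pyRsplit1, hrec]
      cases p' with
      | nil =>
        have ha : ¬(c = '_' ∧ a = '_') := by simpa using h
        have h1 : ¬(['_', '_'].isPrefixOf ([a] ++ [c])) := by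
          intro hcon
          simp [List.isPrefixOf] at hcon
          exact ha ⟨hcon.2.symm, hcon.1.symm⟩
        have h2 : ¬(['_', '_'].isPrefixOf [a]) := by simp [List.isPrefixOf]
        simp only [List.singleton_append, pyRsplit1, h1, h2]
        simp [pyRsplit1, List.isPrefixOf]
        intro h1' h2'
        exact ha ⟨h2'.symm, h1'.symm⟩
      | cons b p'' =>
        have hpre : (['_', '_'].isPrefixOf (a :: b :: p'' ++ [c])) =
            (['_', '_'].isPrefixOf (a :: b :: p'')) := rfl
        by_cases hp : ['_', '_'].isPrefixOf (a :: b :: p'')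
        · rw [show (a :: (b :: p'' ++ [c])) = (a :: b :: p'') ++ [c] by simp]
          rw [hpre] at *
          simp [hp]
        · rw [show (a :: (b :: p'' ++ [c])) = (a :: b :: p'') ++ [c] by simp]
          rw [hpre] at *
          simp [hp]

theorem pyRsplit1_snoc_us (p : List Char) (hp : p.getLast? = some '_') :
    pyRsplit1 (p ++ ['_']) ['_', '_'] = some (p.dropLast, []) := by
  induction p with
  | nil => simp at hp
  | cons a p' ih =>
    cases p' with
    | nil =>
      simp only [List.getLast?_singleton, Option.some.injEq] at hp
      subst hp
      rfl
    | cons b p'' =>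
      have hp' : (b :: p'').getLast? = some '_' := by
        simpa [List.getLast?_cons_cons] using hp
      rw [List.cons_append, pyRsplit1, ih hp']
      simp [List.dropLast]

theorem tail2_snoc (p : List Char) (c : Char)
    (h : ¬(c = '_' ∧ p.getLast? = some '_')) :
    tail2 (p ++ [c]) = tail2 p ++ [c] := by
  unfold tail2
  rw [pyRsplit1_snoc p c h]
  cases hrec : pyRsplit1 p ['_', '_'] with
  | some q => obtain ⟨l, r⟩ := q; rfl
  | none => rfl

theorem tail2_snoc_us (p : List Char) (hp : p.getLast? = some '_') :
    tail2 (p ++ ['_']) = [] := by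
  unfold tail2
  rw [pyRsplit1_snoc_us p hp]

-- over a space-free token the scan's cur is exactly "after the last __"
theorem foldl_stepB_token (p : List Char) (hp : ' ' ∉ p) :
    p.foldl stepB ([], [], false) = ([], tail2 p, decide (p.getLast? = some '_')) := by
  induction p using List.reverseRecOn with
  | nil => simp [tail2, pyRsplit1]
  | append_singleton p c ih =>
    have hc : c ≠ ' ' := by simp at hp; exact fun h => hp.2 h.symm
    have hpp : ' ' ∉ p := by simp at hp; exact hp.1
    rw [List.foldl_append, ih hpp]
    simp only [List.foldl_cons, List.foldl_nil, stepB, if_neg hc]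
    by_cases hus : c = '_' ∧ p.getLast? = some '_'
    · obtain ⟨hc1, hc2⟩ := hus
      subst hc1
      rw [if_pos (by exact ⟨rfl, by simp [hc2]⟩)]
      rw [tail2_snoc_us p hc2]
      simp [hc2]
    · have hcond : ¬(c = '_' ∧ decide (p.getLast? = some '_') = true) := by
        simpa using hus
      rw [if_neg hcond, tail2_snoc p c hus]
      simp only [Prod.mk.injEq, true_and, List.getLast?_concat]
      by_cases hcu : c = '_' <;> simp [hcu]

theorem mem_space_of_infix {cs : List Char} (h : ' ' ∈ cs) : [' '] <:+: cs := by
  obtain ⟨s, t, hst⟩ := List.append_of_mem h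
  exact ⟨s, t, by simp [hst]⟩

theorem infix_of_prefix_part {l r cs : List Char} (hcs : cs = l ++ ' ' :: r) :
    (∀ x, x <:+: l → x <:+: cs) ∧ (∀ x, x <:+: r → x <:+: cs) := by
  constructor
  · intro x hx
    exact hx.trans ⟨[], ' ' :: r, by simp [hcs]⟩
  · intro x hx
    exact hx.trans ⟨l ++ [' '], [], by simp [hcs]⟩

theorem shortenA_eq_shortenB : ∀ cs, shortenA cs = shortenB cs := by
  have main : ∀ n cs, (cs : List Char).length ≤ n → shortenA cs = shortenB cs := by
    intro n
    induction n with
    | zero =>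
      intro cs hlen
      have hnil : cs = [] := List.eq_nil_of_length_eq_zero (Nat.le_zero.mp hlen)
      subst hnil
      rw [shortenA]
      decide
    | succ n ih =>
      intro cs hlen
      by_cases hin : PySem.Chars.isIn ['_', '_'] cs = true
      · rw [shortenA, if_pos hin]
        split
        · rename_i hsp
          have hnos : ¬ [' '] <:+: cs := (pyRsplit1_none_iff (by simp)).mp hsp
          have hmem : ' ' ∉ cs := fun h => hnos (mem_space_of_infix h)
          have hB : shortenB cs = tail2 cs := by
            unfold shortenB
            rw [foldl_stepB_token cs hmem]
            simp
          rw [hB]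
          unfold tail2
          cases pyRsplit1 cs ['_', '_'] with
          | some q => obtain ⟨a, b⟩ := q; rfl
          | none => rfl
        · rename_i l r hsp
          have hcs : cs = l ++ ' ' :: r := by
            have := pyRsplit1_some_eq hsp
            simpa using this
          have hlens := pyRsplit1_length hsp
          have hll : l.length ≤ n := by simp at hlens; omega
          have hrl : r.length ≤ n := by simp at hlens; omega
          rw [ih l hll, ih r hrl, hcs, shortenB_split]
      · rw [shortenA, if_neg hin]
        have hnin : ¬ ['_', '_'] <:+: cs := by
          rcases hx : PySem.Chars.isIn ['_', '_'] cs with _ | _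
          · exact (PySem.Chars.isIn_eq_false_iff _ _).mp hx
          · exact absurd hx hin
        cases hsp : pyRsplit1 cs [' '] with
        | some q =>
          obtain ⟨l, r⟩ := q
          have hcs : cs = l ++ ' ' :: r := by
            have := pyRsplit1_some_eq hsp
            simpa using this
          have hlens := pyRsplit1_length hsp
          have hll : l.length ≤ n := by simp at hlens; omega
          have hrl : r.length ≤ n := by simp at hlens; omega
          have hmono := infix_of_prefix_part hcs
          have hnl : ¬ ['_', '_'] <:+: l := fun h => hnin (hmono.1 _ h)
          have hnr : ¬ ['_', '_'] <:+: r := fun h => hnin (hmono.2 _ h)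
          have hAl : shortenA l = l := by
            rw [shortenA, if_neg (by simp [(PySem.Chars.isIn_eq_false_iff _ _).mpr hnl])]
          have hAr : shortenA r = r := by
            rw [shortenA, if_neg (by simp [(PySem.Chars.isIn_eq_false_iff _ _).mpr hnr])]
          have hBl : shortenB l = l := by rw [← ih l hll, hAl]
          have hBr : shortenB r = r := by rw [← ih r hrl, hAr]
          rw [hcs, shortenB_split, hBl, hBr]
        | none =>
          have hnos : ¬ [' '] <:+: cs := (pyRsplit1_none_iff (by simp)).mp hsp
          have hmem : ' ' ∉ cs := fun h => hnos (mem_space_of_infix h)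
          have hB : shortenB cs = tail2 cs := by
            unfold shortenB
            rw [foldl_stepB_token cs hmem]
            simp
          rw [hB]
          unfold tail2
          rw [(pyRsplit1_none_iff (by simp)).mpr hnin]
  exact fun cs => main cs.length cs le_rfl

-- ===== VERDICT (by name: the statement is the Claim_ definition above) =====
theorem shorten_param_spec : Claim_equal_shorten_param := by
  intro s _
  unfold Spec_shorten_param shorten_param shorten_param_alt
  rw [shortenA_eq_shortenB]
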